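-- pv_equiv track=rewrite | github.com/xjqgo/python_test | test/五子棋.py | get_line_score
-- ===== SOURCE A (Python) =====
-- SCORE_FIVE = 100000  # 连五
--
-- SCORE_FOUR = 10000   # 活四
--
-- SCORE_BLOCKED_FOUR = 1000  # 冲四
--
-- SCORE_THREE = 1000   # 活三
--
-- SCORE_BLOCKED_THREE = 100  # 眠三
--
-- SCORE_TWO = 100      # 活二11
--
-- SCORE_BLOCKED_TWO = 10   # 眠二
--
-- def get_line_score(line, player):
--     """评估一条线的分数"""
--     score = 0
--     length = len(line)
--     count = 0
--     blocked = 0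
--
--     for i in range(length):
--         if line[i] == player:
--             count += 1
--         elif line[i] == '+':
--             if count >= 5:
--                 score += SCORE_FIVE
--             elif count == 4:
--                 if blocked == 0:
--                     score += SCORE_FOUR
--                 else:
--                     score += SCORE_BLOCKED_FOUR
--             elif count == 3:
--                 if blocked == 0:
--                     score += SCORE_THREE
--                 else:
--                     score += SCORE_BLOCKED_THREE
--             elif count == 2:
--                 if blocked == 0:
--                     score += SCORE_TWO
--                 else:
--                     score += SCORE_BLOCKED_TWO
--             count = 0
--             blocked = 0
--         else:
--             if count >= 5:
--                 score += SCORE_FIVE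
--             elif count == 4:
--                 score += SCORE_BLOCKED_FOUR
--             elif count == 3:
--                 score += SCORE_BLOCKED_THREE
--             elif count == 2:
--                 score += SCORE_BLOCKED_TWO
--             count = 0
--             blocked = 1
--
--     # 处理边界情况
--     if count >= 5:
--         score += SCORE_FIVE
--     elif count == 4:
--         score += SCORE_BLOCKED_FOUR
--     elif count == 3:
--         score += SCORE_BLOCKED_THREE
--     elif count == 2:
--         score += SCORE_BLOCKED_TWO
--
--     return score
-- ===== SOURCE B (Python) =====
-- SCORE_FIVE = 100000
-- SCORE_FOUR = 10000
-- SCORE_BLOCKED_FOUR = 1000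
-- SCORE_THREE = 1000
-- SCORE_BLOCKED_THREE = 100
-- SCORE_TWO = 100
-- SCORE_BLOCKED_TWO = 10
--
--
-- def _run_score(cnt, both_open):
--     """Score one maximal run of `cnt` player stones given whether both ends are open."""
--     if cnt >= 5:
--         return SCORE_FIVE
--     if cnt == 4:
--         return SCORE_FOUR if both_open else SCORE_BLOCKED_FOUR
--     if cnt == 3:
--         return SCORE_THREE if both_open else SCORE_BLOCKED_THREE
--     if cnt == 2:
--         return SCORE_TWO if both_open else SCORE_BLOCKED_TWO
--     return 0
--
--
-- def get_line_score(line, player):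
--     """Split the line into maximal runs of player stones and score each run
--     by its length and the openness of its two ends (start of line counts as
--     open on the left, end of line counts as blocked on the right)."""
--     score = 0
--     left_open = True
--     i, n = 0, len(line)
--     while i < n:
--         if line[i] != player:
--             left_open = line[i] == '+'
--             i += 1
--         else:
--             j = i
--             while j < n and line[j] == player:
--                 j += 1
--             right_open = j < n and line[j] == '+'
--             score += _run_score(j - i, left_open and right_open)
--             left_open = False
--             i = j
--     return score
-- ===== Notes on version B (the rewrite author's own statement) =====
-- stated objective: alternative
-- what changed: Replaces A's streaming count/blocked state machine (with triplicated scoring chains at '+', at enemy cells and at end of line) with a run decomposition: scan maximal runs of player stones with two pointers and score each run once from its length and the openness of its two ends.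
import Mathlib
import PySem

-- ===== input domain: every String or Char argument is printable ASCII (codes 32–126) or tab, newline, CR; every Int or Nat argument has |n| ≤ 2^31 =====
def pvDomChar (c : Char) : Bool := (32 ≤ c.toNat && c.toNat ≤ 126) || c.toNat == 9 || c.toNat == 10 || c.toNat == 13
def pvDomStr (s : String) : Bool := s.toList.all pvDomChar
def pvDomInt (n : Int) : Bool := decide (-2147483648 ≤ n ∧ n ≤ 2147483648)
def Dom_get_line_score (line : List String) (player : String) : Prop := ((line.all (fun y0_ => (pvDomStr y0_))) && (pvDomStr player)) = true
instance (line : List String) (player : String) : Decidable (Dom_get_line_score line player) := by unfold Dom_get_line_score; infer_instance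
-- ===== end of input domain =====

-- B replaces A's streaming count/blocked state machine by a run decomposition
-- (score each maximal run of player stones once from its length and end openness);
-- same O(n) cost, different structure.

-- ===== PORT A =====
-- score added when a run ends at a '+' cell (A's first elif chain)
def pvOpenA (count blocked : Int) : Int :=
  if count ≥ 5 then 100000
  else if count = 4 then (if blocked = 0 then 10000 else 1000)
  else if count = 3 then (if blocked = 0 then 1000 else 100)
  else if count = 2 then (if blocked = 0 then 100 else 10)
  else 0

-- score added when a run ends at an enemy cell or at the end of the line (A's else chain / final chain)
def pvClosedA (count : Int) : Int :=
  if count ≥ 5 then 100000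
  else if count = 4 then 1000
  else if count = 3 then 100
  else if count = 2 then 10
  else 0

-- loop body of A over state (score, count, blocked)
def pvStepA (player : String) (st : Int × Int × Int) (x : String) : Int × Int × Int :=
  if x == player then (st.1, st.2.1 + 1, st.2.2)
  else if x == "+" then (st.1 + pvOpenA st.2.1 st.2.2, 0, 0)
  else (st.1 + pvClosedA st.2.1, 0, 1)

def get_line_score (line : List String) (player : String) : Int :=
  let st := line.foldl (pvStepA player) (0, 0, 0)
  st.1 + pvClosedA st.2.1

-- ===== PORT B =====
-- Source B's _run_score
def pvRunScore (cnt : Nat) (bothOpen : Bool) : Int :=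
  if cnt ≥ 5 then 100000
  else if cnt = 4 then (if bothOpen then 10000 else 1000)
  else if cnt = 3 then (if bothOpen then 1000 else 100)
  else if cnt = 2 then (if bothOpen then 100 else 10)
  else 0

-- Source B's outer while loop; the inner while is takeWhile/dropWhile
def pvGoB (player : String) (leftOpen : Bool) : List String → Int
  | [] => 0
  | x :: xs =>
    if _h : x == player then
      let run := (x :: xs).takeWhile (· == player)
      let rest := (x :: xs).dropWhile (· == player)
      let rightOpen := match rest with | [] => false | y :: _ => y == "+"
      pvRunScore run.length (leftOpen && rightOpen) + pvGoB player false rest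
    else pvGoB player (x == "+") xs
termination_by l => l.length
decreasing_by
· simp only [List.dropWhile_cons, _h, if_true]
  exact Nat.lt_succ_of_le (List.length_dropWhile_le _ _)
· exact Nat.lt_succ_self xs.length

def get_line_score_alt (line : List String) (player : String) : Int :=
  pvGoB player true line

-- ===== PRECONDITION & SPEC =====
def Spec_get_line_score (line : List String) (player : String) (out : Int) : Prop := out = get_line_score_alt line player
instance (line : List String) (player : String) (out : Int) : Decidable (Spec_get_line_score line player out) := by unfold Spec_get_line_score; infer_instance

-- ===== CLAIM (what is proved, stated in full; the proofs are below) =====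
def Claim_equal_get_line_score : Prop := ∀ (line : List String) (player : String), Dom_get_line_score line player → Spec_get_line_score line player (get_line_score line player)

-- ===== LEMMAS AND PROOFS =====

-- proof-side characterisation of A's remaining computation from state (count, blocked)
def pvF (player : String) (c b : Int) : List String → Int
  | [] => pvClosedA c
  | x :: xs =>
    if x == player then pvF player (c + 1) b xs
    else if x == "+" then pvOpenA c b + pvF player 0 0 xs
    else pvClosedA c + pvF player 0 1 xs

lemma foldA_eq_F (player : String) :
    ∀ (l : List String) (s c b : Int),
      (l.foldl (pvStepA player) (s, c, b)).1 + pvClosedA (l.foldl (pvStepA player) (s, c, b)).2.1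
        = s + pvF player c b l := by
  intro l
  induction l with
  | nil => intro s c b; simp [pvF]
  | cons x xs ih =>
    intro s c b
    by_cases hx : (x == player) = true
    · simp [List.foldl_cons, pvStepA, hx, pvF, ih]
    · by_cases hp : (x == "+") = true
      · simp [List.foldl_cons, pvStepA, hx, hp, pvF, ih]; ring
      · simp [List.foldl_cons, pvStepA, hx, hp, pvF, ih]; ring

lemma closedA_eq_runScore (k : Nat) : pvClosedA (↑k) = pvRunScore k false := by
  simp only [pvClosedA, pvRunScore]
  split_ifs <;> simp_all <;> omega

lemma openA_eq_runScore (k : Nat) (lo : Bool) :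
    pvOpenA (↑k) (if lo then 0 else 1) = pvRunScore k lo := by
  simp only [pvOpenA, pvRunScore]
  cases lo <;> split_ifs <;> simp_all <;> omega

lemma F_run (player : String) :
    ∀ (l : List String) (c b : Int),
      pvF player c b l
        = pvF player (c + (l.takeWhile (· == player)).length) b (l.dropWhile (· == player)) := by
  intro l
  induction l with
  | nil => intro c b; simp
  | cons x xs ih =>
    intro c b
    by_cases hx : (x == player) = true
    · simp only [pvF, if_true, List.takeWhile_cons, List.dropWhile_cons, hx,
        List.length_cons, ih]
      congr 1
      push_cast
      ring
    · simp [pvF, hx]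

lemma dropWhile_head_false {α : Type} (p : α → Bool) :
    ∀ (l : List α) (y : α) (ys : List α), l.dropWhile p = y :: ys → p y = false := by
  intro l
  induction l with
  | nil => intro y ys h; simp at h
  | cons x xs ih =>
    intro y ys h
    by_cases hx : p x = true
    · rw [List.dropWhile_cons, if_pos hx] at h; exact ih y ys h
    · rw [List.dropWhile_cons, if_neg hx] at h
      cases h
      simpa using hx

lemma openA_zero (b : Int) : pvOpenA 0 b = 0 := by
  simp [pvOpenA]

lemma goB_eq_F (player : String) :
    ∀ (n : Nat) (l : List String) (lo : Bool), l.length ≤ n →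
      pvGoB player lo l = pvF player 0 (if lo then 0 else 1) l := by
  intro n
  induction n with
  | zero =>
    intro l lo hl
    have : l = [] := List.eq_nil_of_length_eq_zero (Nat.le_zero.mp hl)
    subst this
    simp [pvGoB, pvF, pvClosedA]
  | succ n ih =>
    intro l lo hl
    cases l with
    | nil => simp [pvGoB, pvF, pvClosedA]
    | cons x xs =>
      by_cases hx : (x == player) = true
      · have e : pvGoB player lo (x :: xs)
            = pvRunScore ((x :: xs).takeWhile (· == player)).length
                (lo && (match (x :: xs).dropWhile (· == player) with
                        | [] => false | y :: _ => y == "+"))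
              + pvGoB player false ((x :: xs).dropWhile (· == player)) := by
          rw [pvGoB, dif_pos hx]
        have hrestlen : ((x :: xs).dropWhile (· == player)).length ≤ (x :: xs).length :=
          List.length_dropWhile_le _ _
        rw [e, F_run player (x :: xs) 0 (if lo then 0 else 1)]
        cases hrc : (x :: xs).dropWhile (· == player) with
        | nil =>
          simp [Bool.and_false, pvGoB, pvF, closedA_eq_runScore]
        | cons y ys =>
          have hy : (y == player) = false := dropWhile_head_false _ (x :: xs) y ys hrc
          have hys : ys.length ≤ n := by
            rw [hrc] at hrestlen
            simp only [List.length_cons] at hrestlen hl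
            omega
          simp only [pvF, hy, Bool.false_eq_true, if_false, zero_add]
          by_cases hp : (y == "+") = true
          · simp only [hp, if_true]
            rw [pvGoB, dif_neg (by simp [hy]), hp]
            rw [ih ys true hys, openA_eq_runScore]
            simp
          · have hp' : (y == "+") = false := by simpa using hp
            simp only [hp', Bool.false_eq_true, if_false]
            rw [pvGoB, dif_neg (by simp [hy]), hp']
            rw [ih ys false hys]
            simp [closedA_eq_runScore]
      · rw [pvGoB, dif_neg (by simp_all)]
        simp only [pvF, hx, Bool.false_eq_true, if_false]
        by_cases hp : (x == "+") = true
        · rw [hp]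
          rw [ih xs true (by simpa using Nat.le_of_succ_le_succ (by simpa using hl))]
          simp [openA_zero]
        · simp only [hp, Bool.false_eq_true, if_false]
          rw [ih xs false (by simpa using Nat.le_of_succ_le_succ (by simpa using hl))]
          simp [pvClosedA]

-- ===== VERDICT (by name: the statement is the Claim_ definition above) =====
theorem get_line_score_spec : Claim_equal_get_line_score := by
  intro line player _
  unfold Spec_get_line_score get_line_score get_line_score_alt
  rw [goB_eq_F player line.length line true le_rfl]
  have h := foldA_eq_F player line 0 0 0
  simpa using h
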